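-- pv_equiv track=rewrite | github.com/paulvanvliet/pitchfx-scraper | scrape.py | parse_runners
-- ===== SOURCE A (Python) =====
-- def parse_runners(tags):
--     '''
--         Parse all the <runner> tags from the <atbat> tags to get
--         the information about the current runners on base for the atbat.
--         Return a list of the information so it may be appended to the running
--         list
--     '''
--     r1 = r2 = r3 = rbi = 0
--
--     for r in tags:
--         if r['start'] == '1B':
--             r1 = 1
--         elif r['start'] == '2B':
--             r2 = 1
--         elif r['start'] == '3B':
--             r3 = 1
--
--         try:
--             if r['rbi'] == 'T': rbi = rbi + 1
--         except: pass
--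
--     return [r1, r2, r3, rbi, r2+r3]
-- ===== SOURCE B (Python) =====
-- def parse_runners(tags):
--     tags = list(tags)
--     starts = [r['start'] for r in tags]
--     r1 = int('1B' in starts)
--     r2 = int('2B' in starts)
--     r3 = int('3B' in starts)
--     rbi = sum(1 for r in tags if r.get('rbi') == 'T')
--     return [r1, r2, r3, rbi, r2 + r3]
-- ===== Notes on version B (the rewrite author's own statement) =====
-- stated objective: simpler
-- what changed: Replaces A's single fold carrying four mutable flags/counters with declarative passes: a projected starts list queried by membership for each base flag, and a count of tags whose rbi value is 'T'.
import Mathlib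
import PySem

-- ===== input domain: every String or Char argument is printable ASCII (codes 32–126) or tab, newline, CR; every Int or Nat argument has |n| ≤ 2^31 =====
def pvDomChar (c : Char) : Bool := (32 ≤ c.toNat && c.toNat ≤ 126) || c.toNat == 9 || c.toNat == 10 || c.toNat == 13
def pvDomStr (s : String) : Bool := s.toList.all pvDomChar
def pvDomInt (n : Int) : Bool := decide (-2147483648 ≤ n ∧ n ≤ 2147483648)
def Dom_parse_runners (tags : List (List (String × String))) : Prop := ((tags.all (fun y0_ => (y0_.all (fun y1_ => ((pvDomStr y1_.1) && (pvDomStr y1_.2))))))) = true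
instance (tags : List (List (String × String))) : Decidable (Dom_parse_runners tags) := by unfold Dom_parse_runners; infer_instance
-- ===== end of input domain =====

-- B replaces A's one fold over four mutable flags/counters with membership tests on a
-- projected starts list plus a count of rbi='T' tags (objective: simpler).

-- ===== PORT A =====
-- A's loop: state (r1,r2,r3,rbi); 'start' lookup raising KeyError is the case excluded by Pre_
-- (the recursion leaves the state unchanged there, a value never claimed about).
def parseRunnersGoA : List (List (String × String)) → Int → Int → Int → Int → List Int
  | [], r1, r2, r3, rbi => [r1, r2, r3, rbi, r2 + r3]
  | r :: rest, r1, r2, r3, rbi =>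
    let s := (PySem.Dict.mk r).get? "start"
    let st := if s == some "1B" then (1, r2, r3)
              else if s == some "2B" then (r1, 1, r3)
              else if s == some "3B" then (r1, r2, 1)
              else (r1, r2, r3)
    let rbi' := if (PySem.Dict.mk r).get? "rbi" == some "T" then rbi + 1 else rbi
    parseRunnersGoA rest st.1 st.2.1 st.2.2 rbi'

def parse_runners (tags : List (List (String × String))) : List Int :=
  parseRunnersGoA tags 0 0 0 0

-- ===== PORT B =====
-- starts = [r['start'] for r in tags]; the KeyError case (None lookup) is outside Pre_,
-- totalized with "" which no branch below matches on admitted inputs.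
def parse_runners_alt (tags : List (List (String × String))) : List Int :=
  let starts := tags.map (fun r => ((PySem.Dict.mk r).get? "start").getD "")
  let r1 : Int := if starts.contains "1B" then 1 else 0
  let r2 : Int := if starts.contains "2B" then 1 else 0
  let r3 : Int := if starts.contains "3B" then 1 else 0
  let rbi : Int := (tags.countP (fun r => (PySem.Dict.mk r).get? "rbi" == some "T") : Nat)
  [r1, r2, r3, rbi, r2 + r3]

-- ===== PRECONDITION & SPEC =====
-- Pre_ excludes exactly the inputs where some tag has no 'start' key: there Python A raises
-- KeyError (and Python B raises it too).
def Pre_parse_runners (tags : List (List (String × String))) : Prop :=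
  (tags.all (fun r => ((PySem.Dict.mk r).get? "start").isSome)) = true
instance (tags : List (List (String × String))) : Decidable (Pre_parse_runners tags) := by
  unfold Pre_parse_runners; infer_instance

def pvWitness_parse_runners : (List (List (String × String))) :=
  [[("start", "1B"), ("rbi", "T")], [("start", "")]]

def Spec_parse_runners (tags : List (List (String × String))) (out : List Int) : Prop := out = parse_runners_alt tags
instance (tags : List (List (String × String))) (out : List Int) : Decidable (Spec_parse_runners tags out) := by unfold Spec_parse_runners; infer_instance

-- ===== CLAIM (what is proved, stated in full; the proofs are below) =====
def Claim_equal_parse_runners : Prop := ∀ (tags : List (List (String × String))), Dom_parse_runners tags → Pre_parse_runners tags → Spec_parse_runners tags (parse_runners tags)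

-- ===== LEMMAS AND PROOFS =====

-- characterisation of A's loop in terms of B's membership/count view
lemma parseRunnersGoA_eq (tags : List (List (String × String)))
    (h : (tags.all (fun r => ((PySem.Dict.mk r).get? "start").isSome)) = true) :
    ∀ (r1 r2 r3 rbi : Int),
    parseRunnersGoA tags r1 r2 r3 rbi =
      (let starts := tags.map (fun r => ((PySem.Dict.mk r).get? "start").getD "")
       let m1 : Int := if starts.contains "1B" then 1 else r1
       let m2 : Int := if starts.contains "2B" then 1 else r2
       let m3 : Int := if starts.contains "3B" then 1 else r3
       [m1, m2, m3,
        rbi + (tags.countP (fun r => (PySem.Dict.mk r).get? "rbi" == some "T") : Nat),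
        m2 + m3]) := by
  induction tags with
  | nil => intro r1 r2 r3 rbi; simp [parseRunnersGoA]
  | cons r rest ih =>
    intro r1 r2 r3 rbi
    simp only [List.all_cons, Bool.and_eq_true] at h
    obtain ⟨hs, hrest⟩ := h
    obtain ⟨v, hv⟩ := Option.isSome_iff_exists.mp hs
    simp only [parseRunnersGoA, hv]
    rw [ih hrest]
    simp only [List.map_cons, List.contains_cons, List.countP_cons, hv, Option.getD_some]
    by_cases h1 : v = "1B"
    · subst h1; simp; split_ifs <;> omega
    · by_cases h2 : v = "2B"
      · subst h2; simp; split_ifs <;> omega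
      · by_cases h3 : v = "3B"
        · subst h3; simp; split_ifs <;> omega
        · have h1' : ¬("1B" = v) := fun h => h1 h.symm
          have h2' : ¬("2B" = v) := fun h => h2 h.symm
          have h3' : ¬("3B" = v) := fun h => h3 h.symm
          simp [h1, h2, h3, h1', h2', h3']
          split_ifs <;> omega

-- ===== VERDICT (by name: the statement is the Claim_ definition above) =====
theorem parse_runners_spec : Claim_equal_parse_runners := by
  intro tags _ hpre
  unfold Spec_parse_runners parse_runners parse_runners_alt
  rw [parseRunnersGoA_eq tags hpre]
  simp
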